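-- pv_equiv track=rewrite | github.com/NhuY05/nhuychuongHAM | ham52.py | tichcacsole
-- ===== SOURCE A (Python) =====
-- def tichcacsole(n):
--     tich=1
--     m=0
--     while n>0:
--         m=n%10
--         if m%2!=0:
--             tich*=m
--         n=n//10
--     return tich
-- ===== SOURCE B (Python) =====
-- def tichcacsole(n):
--     if n <= 0:
--         return 1
--     tich = 1
--     for c in str(n):
--         d = int(c)
--         if d % 2 == 1:
--             tich *= d
--     return tich
-- ===== Notes on version B (the rewrite author's own statement) =====
-- stated objective: idiomatic
-- what changed: B iterates over the decimal string representation of n instead of peeling digits arithmetically with a while loop; a non-positive n yields the empty product directly, matching A's never-entered loop.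
import Mathlib
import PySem

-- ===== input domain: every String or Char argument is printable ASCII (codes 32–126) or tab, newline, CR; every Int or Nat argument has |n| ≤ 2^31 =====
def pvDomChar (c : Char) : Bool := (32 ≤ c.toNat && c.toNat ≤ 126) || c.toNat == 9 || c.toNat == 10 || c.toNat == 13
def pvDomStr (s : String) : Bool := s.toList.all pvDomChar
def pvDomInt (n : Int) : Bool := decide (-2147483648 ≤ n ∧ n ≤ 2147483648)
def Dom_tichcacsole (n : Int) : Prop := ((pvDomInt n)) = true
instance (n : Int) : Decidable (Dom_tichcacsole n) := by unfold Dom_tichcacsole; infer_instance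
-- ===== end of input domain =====

-- B replaces A's arithmetic digit-peeling while loop by iteration over the decimal string of n (idiomatic; same cost).

-- ===== PORT A =====
-- the while loop of A, carrying the accumulator tich; n decreases via n//10
def tichcacsoleGo (n tich : Int) : Int :=
  if _h : n > 0 then
    let m := PySem.Int.mod n 10
    tichcacsoleGo (PySem.Int.floordiv n 10)
      (if PySem.Int.mod m 2 ≠ 0 then tich * m else tich)
  else tich
termination_by n.toNat
decreasing_by
  rw [PySem.Int.floordiv_eq_ediv_of_pos (by omega)]
  omega

def tichcacsole (n : Int) : Int := tichcacsoleGo n 1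

-- ===== PORT B =====
def tichcacsole_alt (n : Int) : Int :=
  if n ≤ 0 then 1
  else
    (PySem.Int.toStr n).toList.foldl
      (fun tich c =>
        -- int(c): exact for the decimal digit characters str(n) produces on n > 0
        let d : Int := (c.toNat : Int) - 48
        if PySem.Int.mod d 2 = 1 then tich * d else tich) 1

-- ===== PRECONDITION & SPEC =====
def Spec_tichcacsole (n : Int) (out : Int) : Prop := out = tichcacsole_alt n
instance (n : Int) (out : Int) : Decidable (Spec_tichcacsole n out) := by unfold Spec_tichcacsole; infer_instance

-- ===== CLAIM (what is proved, stated in full; the proofs are below) =====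
def Claim_equal_tichcacsole : Prop := ∀ (n : Int), Dom_tichcacsole n → Spec_tichcacsole n (tichcacsole n)

-- ===== LEMMAS AND PROOFS =====

-- product of the odd digits of a natural number (shared characterisation of both ports)
def podd (m : Nat) : Int :=
  if h : m = 0 then 1
  else if m % 10 % 2 = 1 then podd (m / 10) * ((m % 10 : Nat) : Int) else podd (m / 10)
decreasing_by all_goals exact Nat.div_lt_self (Nat.pos_of_ne_zero h) (by omega)

-- B's loop body applied to the character of digit k (k < 10)
lemma dchar_val (k : Nat) (hk : k < 10) :
    ((Nat.digitChar k).toNat : Int) - 48 = (k : Int) := by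
  interval_cases k <;> decide

lemma podd_unfold (m : Nat) (hm : m ≠ 0) :
    podd m = if m % 10 % 2 = 1 then podd (m / 10) * ((m % 10 : Nat) : Int) else podd (m / 10) := by
  rw [podd]; simp [hm]

-- one step of B's foldl, beta/zeta-reduced
lemma foldl_cons_step (acc : Int) (c : Char) (ds : List Char) :
    List.foldl
      (fun tich c =>
        let d : Int := (c.toNat : Int) - 48
        if PySem.Int.mod d 2 = 1 then tich * d else tich) acc (c :: ds)
    = List.foldl
      (fun tich c =>
        let d : Int := (c.toNat : Int) - 48
        if PySem.Int.mod d 2 = 1 then tich * d else tich)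
      (if PySem.Int.mod ((c.toNat : Int) - 48) 2 = 1 then acc * ((c.toNat : Int) - 48) else acc) ds := rfl

lemma fold_toDigitsCore (fuel : Nat) : ∀ (m : Nat) (ds : List Char) (acc : Int), m ≤ fuel →
    List.foldl
      (fun tich c =>
        let d : Int := (c.toNat : Int) - 48
        if PySem.Int.mod d 2 = 1 then tich * d else tich) acc
      (Nat.toDigitsCore 10 (fuel + 1) m ds)
    = List.foldl
      (fun tich c =>
        let d : Int := (c.toNat : Int) - 48
        if PySem.Int.mod d 2 = 1 then tich * d else tich) (acc * podd m) ds := by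
  induction fuel with
  | zero =>
    intro m ds acc hm
    interval_cases m
    have hp0 : podd 0 = 1 := by rw [podd]; norm_num
    simp only [Nat.toDigitsCore]
    norm_num [foldl_cons_step, hp0]
    rw [if_neg (by decide : ¬ (((Nat.digitChar 0).toNat : Int) - 48) % 2 = 1)]
  | succ f ih =>
    intro m ds acc hm
    rw [Nat.toDigitsCore]
    by_cases h0 : m / 10 = 0
    · -- single digit: m < 10
      have hlt : m % 10 < 10 := Nat.mod_lt _ (by omega)
      have hmlt : m < 10 := by omega
      rw [if_pos h0, foldl_cons_step, dchar_val (m % 10) hlt]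
      have hcond : (PySem.Int.mod ((m % 10 : Nat) : Int) 2 = 1) ↔ m % 10 % 2 = 1 := by
        rw [PySem.Int.mod_eq_emod_of_pos (by norm_num)]; omega
      have hp0 : podd 0 = 1 := by rw [podd]; norm_num
      by_cases hz : m = 0
      · subst hz
        rw [if_neg (by decide : ¬ PySem.Int.mod ((0 % 10 : Nat) : Int) 2 = 1), podd]
        norm_num
      · rw [podd_unfold m hz]
        have hmm : m % 10 = m := Nat.mod_eq_of_lt hmlt
        by_cases hc : m % 10 % 2 = 1
        · rw [if_pos (hcond.mpr hc), if_pos hc, h0, hp0, one_mul, hmm]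
        · rw [if_neg (fun w => hc (hcond.mp w)), if_neg hc, h0, hp0, mul_one]
    · have hge : 10 ≤ m := by
        by_contra hcon
        exact h0 (Nat.div_eq_of_lt (by omega))
      have hrec : m / 10 ≤ f := by
        have := Nat.div_lt_self (by omega : 0 < m) (by omega : 1 < 10)
        omega
      rw [if_neg h0, ih (m / 10) _ acc hrec, foldl_cons_step,
        dchar_val (m % 10) (Nat.mod_lt _ (by omega))]
      rw [podd_unfold m (by omega)]
      have hcond : (PySem.Int.mod ((m % 10 : Nat) : Int) 2 = 1) ↔ m % 10 % 2 = 1 := by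
        rw [PySem.Int.mod_eq_emod_of_pos (by norm_num)]; omega
      by_cases hc : m % 10 % 2 = 1
      · rw [if_pos (hcond.mpr hc), if_pos hc]
        ring_nf
      · rw [if_neg (fun w => hc (hcond.mp w)), if_neg hc]

lemma go_eq (k : Nat) : ∀ (n acc : Int), n.toNat = k → tichcacsoleGo n acc = acc * podd n.toNat := by
  induction k using Nat.strong_induction_on with
  | _ k ih =>
    intro n acc hk
    rw [tichcacsoleGo]
    by_cases h : n > 0
    · have hd : PySem.Int.floordiv n 10 = n / 10 := PySem.Int.floordiv_eq_ediv_of_pos (by omega)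
      have hm : PySem.Int.mod n 10 = n % 10 := PySem.Int.mod_eq_emod_of_pos (by omega)
      have hm2 : PySem.Int.mod (PySem.Int.mod n 10) 2 = (n % 10) % 2 := by
        rw [hm, PySem.Int.mod_eq_emod_of_pos (by omega)]
      have hlt : (n / 10).toNat < k := by omega
      rw [dif_pos h]
      simp only [hd, hm]
      rw [ih _ hlt _ _ rfl]
      rw [podd_unfold n.toNat (by omega)]
      rw [PySem.Int.mod_eq_emod_of_pos (by norm_num : (0:Int) < 2)]
      have e2 : ((n.toNat % 10 : Nat) : Int) = n % 10 := by omega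
      have e3 : (n / 10).toNat = n.toNat / 10 := by omega
      rw [e3]
      by_cases hc : n.toNat % 10 % 2 = 1
      · rw [if_pos (by omega : (n % 10) % 2 ≠ 0), if_pos hc, e2]
        ring
      · rw [if_neg (by omega : ¬ (n % 10) % 2 ≠ 0), if_neg hc]
    · rw [dif_neg h]
      have : n.toNat = 0 := by omega
      rw [this, podd]
      simp

-- ===== VERDICT (by name: the statement is the Claim_ definition above) =====
theorem tichcacsole_spec : Claim_equal_tichcacsole := by
  intro n _
  unfold Spec_tichcacsole tichcacsole tichcacsole_alt
  by_cases h : n ≤ 0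
  · rw [go_eq n.toNat n 1 rfl, if_pos h]
    have : n.toNat = 0 := by omega
    rw [this, podd]
    simp
  · rw [go_eq n.toNat n 1 rfl, if_neg h]
    have hts : (PySem.Int.toStr n).toList = Nat.toDigits 10 n.toNat := by
      rw [PySem.Int.toList_toStr, PySem.Int.toChars, if_neg (by omega)]
    rw [hts, Nat.toDigits, fold_toDigitsCore n.toNat n.toNat [] 1 le_rfl]
    simp
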